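-- pv_equiv track=rewrite | github.com/igbiga/bioinfo | Iga_Niemiec_RNA2nd_final.py | find_seq
-- ===== SOURCE A (Python) =====
-- def find_seq(input_file): # zwraca sekwencję w formacie dot-bracket z wczytywanego pliku
--     sequence = ""
--     bases = ["A", "C", "U", "G", "N"]
--     signs = [".", "(", ")", "[", "]", ">", "<", "{", "}"]
--     # listy zasad azotowych (po nich następuje właściwa sekwencja dot-bracket), oraz znaków w poszukiewanym formacie
--     for i in range(len(input_file)):
--         if input_file[i] in bases and input_file[i+1] in signs and input_file[i+2] in signs and input_file[i+3] in signs: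
--             sequence = (input_file[i+1:])
--     return sequence
-- ===== SOURCE B (Python) =====
-- def find_seq(input_file):
--     bases = {"A", "C", "U", "G", "N"}
--     signs = {".", "(", ")", "[", "]", ">", "<", "{", "}"}
--     s = input_file
--     for i in range(len(s) - 4, -1, -1):
--         if s[i] in bases and s[i + 1] in signs and s[i + 2] in signs and s[i + 3] in signs:
--             return s[i + 1:]
--     return ""
-- ===== Notes on version B (the rewrite author's own statement) =====
-- stated objective: faster
-- what changed: B scans backwards and returns the suffix at the first (i.e. last) match with a single slice, instead of A's forward scan that re-slices the whole string at every match.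
import Mathlib
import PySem

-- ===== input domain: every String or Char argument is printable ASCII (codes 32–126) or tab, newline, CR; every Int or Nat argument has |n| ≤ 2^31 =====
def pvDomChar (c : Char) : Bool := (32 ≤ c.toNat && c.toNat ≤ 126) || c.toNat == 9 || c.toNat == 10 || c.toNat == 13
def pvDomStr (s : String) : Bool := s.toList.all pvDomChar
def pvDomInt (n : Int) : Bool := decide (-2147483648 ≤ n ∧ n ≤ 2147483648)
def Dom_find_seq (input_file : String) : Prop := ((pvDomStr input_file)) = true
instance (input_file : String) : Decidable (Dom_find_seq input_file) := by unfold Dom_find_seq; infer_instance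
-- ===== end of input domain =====

-- B replaces A's forward scan (which re-slices the whole string at every match) by a single
-- backward scan that slices once at the last matching position; return values agree on Pre_.

-- ===== PORT A =====
def pvBases : List Char := ['A', 'C', 'U', 'G', 'N']
def pvSigns : List Char := ['.', '(', ')', '[', ']', '>', '<', '{', '}']

-- literal port of A: for i in range(len(s)): if s[i] in bases and s[i+1] in signs and …: sequence = s[i+1:]
def find_seq (input_file : String) : String :=
  let s := input_file.toList
  String.mk <|
    (PySem.List.pyRange 0 (PySem.Str.len input_file) 1).foldl
      (fun seq i =>
        let ok :=
          match PySem.List.pyGet? s i, PySem.List.pyGet? s (i + 1),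
                PySem.List.pyGet? s (i + 2), PySem.List.pyGet? s (i + 3) with
          | some a, some b, some c, some d =>
              pvBases.contains a && pvSigns.contains b && pvSigns.contains c && pvSigns.contains d
          | _, _, _, _ => false
        if ok then PySem.List.slice s (some (i + 1)) none else seq)
      []

-- ===== PORT B =====
-- B's match test at index i: s[i] in bases and s[i+1..i+3] in signs (indices in range by construction)
def pvCheckB (s : List Char) (i : Nat) : Bool :=
  pvBases.contains (s.getD i ' ') && pvSigns.contains (s.getD (i + 1) ' ')
    && pvSigns.contains (s.getD (i + 2) ' ') && pvSigns.contains (s.getD (i + 3) ' ')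

-- literal port of B's backward loop: for i in range(len(s)-4, -1, -1): … return s[i+1:]; return ""
def pvAltLoop (s : List Char) : Nat → List Char
  | 0 => []
  | j + 1 => if pvCheckB s j then s.drop (j + 1) else pvAltLoop s j

def find_seq_alt (input_file : String) : String :=
  let s := input_file.toList
  String.mk (pvAltLoop s (s.length - 3))

-- ===== PRECONDITION & SPEC =====
-- Pre_ excludes exactly the inputs on which A raises IndexError: a base character close enough to
-- the end of the string that A's short-circuit chain reads past the end.
def Pre_find_seq (input_file : String) : Prop :=
  ∀ i : Nat, i < input_file.toList.length →
    pvBases.contains (input_file.toList.getD i ' ') = true →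
      i + 1 < input_file.toList.length ∧
        (pvSigns.contains (input_file.toList.getD (i + 1) ' ') = true →
          i + 2 < input_file.toList.length ∧
            (pvSigns.contains (input_file.toList.getD (i + 2) ' ') = true →
              i + 3 < input_file.toList.length))
instance (input_file : String) : Decidable (Pre_find_seq input_file) := by
  unfold Pre_find_seq; infer_instance

def pvWitness_find_seq : String := "A..."

def Spec_find_seq (input_file : String) (out : String) : Prop := out = find_seq_alt input_file
instance (input_file : String) (out : String) : Decidable (Spec_find_seq input_file out) := by unfold Spec_find_seq; infer_instance

-- ===== CLAIM (what is proved, stated in full; the proofs are below) =====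
def Claim_equal_find_seq : Prop := ∀ (input_file : String), Dom_find_seq input_file → Pre_find_seq input_file → Spec_find_seq input_file (find_seq input_file)

-- ===== LEMMAS AND PROOFS =====

-- A's match test at Nat index k, after normalising pyGet? to getElem?
def pvCheckA (s : List Char) (k : Nat) : Bool :=
  match s[k]?, s[k + 1]?, s[k + 2]?, s[k + 3]? with
  | some a, some b, some c, some d =>
      pvBases.contains a && pvSigns.contains b && pvSigns.contains c && pvSigns.contains d
  | _, _, _, _ => false

-- index of the last match below j, found descending (proof helper)
def pvFind (s : List Char) : Nat → Option Nat
  | 0 => none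
  | j + 1 => if pvCheckB s j then some j else pvFind s j

lemma pvAltLoop_eq_find (s : List Char) (j : Nat) :
    pvAltLoop s j = (pvFind s j).elim [] (fun k => s.drop (k + 1)) := by
  induction j with
  | zero => rfl
  | succ j ih =>
    simp only [pvAltLoop, pvFind]
    split_ifs with h <;> simp [ih]

lemma pvFoldl_eq_find (s : List Char) (j : Nat) (acc : List Char) :
    (List.range j).foldl (fun seq k => if pvCheckB s k then s.drop (k + 1) else seq) acc
      = (pvFind s j).elim acc (fun k => s.drop (k + 1)) := by
  induction j generalizing acc with
  | zero => rfl
  | succ j ih =>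
    rw [List.range_succ, List.foldl_append]
    simp only [List.foldl_cons, List.foldl_nil, pvFind]
    split_ifs with h
    · simp
    · exact ih acc

lemma pvCheckB_false_of_ge (s : List Char) (k : Nat) (h : s.length ≤ k + 3) :
    pvCheckB s k = false := by
  unfold pvCheckB
  rw [List.getD_eq_default _ _ h]
  simp [pvSigns]

lemma pvFind_stable (s : List Char) (m : Nat)
    (hf : ∀ k, m ≤ k → pvCheckB s k = false) :
    ∀ j, m ≤ j → pvFind s j = pvFind s m := by
  intro j
  induction j with
  | zero =>
    intro h
    have hm : m = 0 := by omega
    rw [hm]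
  | succ j ih =>
    intro h
    rcases Nat.eq_or_lt_of_le h with he | hlt
    · rw [he]
    · have hmj : m ≤ j := by omega
      simp only [pvFind, hf j hmj]
      exact ih hmj

lemma pvCheckA_eq_checkB (s : List Char) (hpre : ∀ i : Nat, i < s.length →
      pvBases.contains (s.getD i ' ') = true →
        i + 1 < s.length ∧ (pvSigns.contains (s.getD (i + 1) ' ') = true →
          i + 2 < s.length ∧ (pvSigns.contains (s.getD (i + 2) ' ') = true →
            i + 3 < s.length))) (k : Nat) :
    pvCheckA s k = pvCheckB s k := by
  unfold pvCheckA pvCheckB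
  by_cases h0 : k < s.length
  · have e0 : s.getD k ' ' = s[k] := by
      simp [List.getD_eq_getElem?_getD, List.getElem?_eq_getElem h0]
    rw [List.getElem?_eq_getElem h0, e0]
    by_cases hb : s[k] ∈ pvBases
    · obtain ⟨h1, hrest⟩ := hpre k h0 (by simp [List.getElem?_eq_getElem h0, hb])
      have e1 : s.getD (k + 1) ' ' = s[k + 1] := by
        simp [List.getD_eq_getElem?_getD, List.getElem?_eq_getElem h1]
      rw [List.getElem?_eq_getElem h1, e1]
      by_cases hs1 : s[k + 1] ∈ pvSigns
      · obtain ⟨h2, hrest2⟩ := hrest (by simp [List.getElem?_eq_getElem h1, hs1])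
        have e2 : s.getD (k + 2) ' ' = s[k + 2] := by
          simp [List.getD_eq_getElem?_getD, List.getElem?_eq_getElem h2]
        rw [List.getElem?_eq_getElem h2, e2]
        by_cases hs2 : s[k + 2] ∈ pvSigns
        · have h3 := hrest2 (by simp [List.getElem?_eq_getElem h2, hs2])
          have e3 : s.getD (k + 3) ' ' = s[k + 3] := by
            simp [List.getD_eq_getElem?_getD, List.getElem?_eq_getElem h3]
          rw [List.getElem?_eq_getElem h3, e3]
        · cases h3 : s[k + 3]? <;> simp [hs2]
      · cases h2 : s[k + 2]? <;> cases h3 : s[k + 3]? <;> simp [hs1]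
    · cases h1 : s[k + 1]? <;> cases h2 : s[k + 2]? <;> cases h3 : s[k + 3]? <;> simp [hb]
  · have hn : s.length ≤ k := Nat.le_of_not_lt h0
    rw [List.getElem?_eq_none hn, List.getD_eq_default _ _ hn]
    simp [pvBases]

lemma pvFoldl_ext {α β : Type} (f g : α → β → α) (h : ∀ a b, f a b = g a b)
    (l : List β) (init : α) : l.foldl f init = l.foldl g init := by
  have : f = g := funext fun a => funext fun b => h a b
  rw [this]

-- A in normal form: a foldl over Nat indices with test pvCheckA
lemma find_seq_normal (str : String) :
    find_seq str = String.mk ((List.range str.toList.length).foldl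
      (fun seq k => if pvCheckA str.toList k then str.toList.drop (k + 1) else seq) []) := by
  unfold find_seq
  simp only [PySem.Str.len_eq]
  rw [PySem.List.pyRange_one]
  simp only [Int.sub_zero, Int.toNat_natCast, List.foldl_map]
  refine congrArg String.mk (pvFoldl_ext _ _ ?_ _ _)
  intro seq k
  simp only [zero_add]
  have c1 : ((k : Int) + 1) = (((k + 1 : Nat)) : Int) := by push_cast; ring
  have c2 : ((k : Int) + 2) = (((k + 2 : Nat)) : Int) := by push_cast; ring
  have c3 : ((k : Int) + 3) = (((k + 3 : Nat)) : Int) := by push_cast; ring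
  rw [c1, c2, c3]
  simp only [PySem.List.pyGet?_natCast, PySem.List.slice_from_natCast]
  rfl

-- ===== VERDICT (by name: the statement is the Claim_ definition above) =====
theorem find_seq_spec : Claim_equal_find_seq := by
  intro str _hdom hpre
  unfold Spec_find_seq find_seq_alt
  rw [find_seq_normal]
  set s := str.toList with hs
  congr 1
  have hA : ∀ k, pvCheckA s k = pvCheckB s k := pvCheckA_eq_checkB s hpre
  calc (List.range s.length).foldl
        (fun seq k => if pvCheckA s k then s.drop (k + 1) else seq) []
      = (List.range s.length).foldl
        (fun seq k => if pvCheckB s k then s.drop (k + 1) else seq) [] := by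
        simp only [hA]
    _ = (pvFind s s.length).elim [] (fun k => s.drop (k + 1)) := pvFoldl_eq_find s _ []
    _ = (pvFind s (s.length - 3)).elim [] (fun k => s.drop (k + 1)) := by
        rw [pvFind_stable s (s.length - 3)
          (fun k hk => pvCheckB_false_of_ge s k (by omega)) s.length (by omega)]
    _ = pvAltLoop s (s.length - 3) := (pvAltLoop_eq_find s _).symm
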